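-- pv_equiv track=rewrite | github.com/vinicius-vs/base64 | Base64.py | converter_decimal_para_binario
-- ===== SOURCE A (Python) =====
-- def converter_caracter_para_decimal(texto):
--     tabela64 = ['A', 'B', 'C', 'D', 'E', 'F', 'G', 'H', 'I', 'J', 'K', 'L', 'M', 'N', 'O', 'P', 'Q', 'R', 'S', 'T', 'U',
--                 'V', 'W', 'X', 'Y', 'Z',
--                 'a', 'b', 'c', 'd', 'e', 'f', 'g', 'h', 'i', 'j', 'k', 'l', 'm', 'n', 'o', 'p', 'q', 'r', 's', 't', 'u',
--                 'v', 'w', 'x', 'y', 'z',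
--                 '0', '1', '2', '3', '4', '5', '6', '7', '8', '9', '+', '/']
--     decimal = []
--     for i in range(len(texto)):
--         for a in range(len(tabela64)):
--             if texto[i]==tabela64[a]:
--                 decimal.append(a)
--                 break
--     return decimal
--
-- def converter_decimal_para_binario(texto):
--     binario = []
--     binario_auxiliar = []
--     decimal = converter_caracter_para_decimal(texto)
--     contador = 0
--
--     for i in range(len(decimal)):
--         while decimal[i] > 0:
--             if(decimal[i]%2)>0:
--                 binario_auxiliar.insert(0,1)
--             else:
--                 binario_auxiliar.insert(0,0)
--             contador = contador + 1
--             decimal[i] = int(decimal[i]/2)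
--         while contador < 6:
--             binario_auxiliar.insert(0,0)
--             contador = contador + 1
--         contador = 0
--         binario += binario_auxiliar
--         binario_auxiliar = []
--     return  binario
-- ===== SOURCE B (Python) =====
-- def converter_decimal_para_binario(texto):
--     tabela = 'ABCDEFGHIJKLMNOPQRSTUVWXYZabcdefghijklmnopqrstuvwxyz0123456789+/'
--     indice = {c: i for i, c in enumerate(tabela)}
--     binario = []
--     for ch in texto:
--         i = indice.get(ch)
--         if i is not None:
--             binario.extend(int(b) for b in format(i, '06b'))
--     return binario
-- ===== Notes on version B (the rewrite author's own statement) =====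
-- stated objective: simpler
-- what changed: Replaces the nested 64-entry table scan, the halving while-loop with front-insertion, the counter and the left-padding loop by a precomputed char-to-index dict and direct six-bit string formatting of each index.
import Mathlib
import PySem

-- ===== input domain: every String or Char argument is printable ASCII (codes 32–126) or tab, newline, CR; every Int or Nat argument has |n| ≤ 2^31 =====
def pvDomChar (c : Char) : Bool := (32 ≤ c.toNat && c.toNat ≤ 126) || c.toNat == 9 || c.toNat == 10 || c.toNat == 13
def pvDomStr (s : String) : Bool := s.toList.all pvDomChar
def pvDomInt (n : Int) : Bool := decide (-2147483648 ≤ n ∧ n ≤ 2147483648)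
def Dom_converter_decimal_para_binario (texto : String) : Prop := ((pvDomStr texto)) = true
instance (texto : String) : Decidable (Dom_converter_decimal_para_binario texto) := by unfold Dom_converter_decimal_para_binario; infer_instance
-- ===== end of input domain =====

set_option maxRecDepth 4000


-- B replaces A's linear table scan and halving/padding loops by a char->index dict and a direct 6-bit rendering (simpler; same results).

-- ===== PORT A =====
def pvTabela64 : List Char :=
  ['A','B','C','D','E','F','G','H','I','J','K','L','M','N','O','P','Q','R','S','T','U',
   'V','W','X','Y','Z',
   'a','b','c','d','e','f','g','h','i','j','k','l','m','n','o','p','q','r','s','t','u',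
   'v','w','x','y','z',
   '0','1','2','3','4','5','6','7','8','9','+','/']

-- inner 'for a in range(len(tabela64)): if texto[i]==tabela64[a]: append; break'
def pvScanTab (c : Char) : List (Int × Char) → Option Int
  | [] => none
  | (a, t) :: rest => if c == t then some a else pvScanTab c rest

def converter_caracter_para_decimal (texto : String) : List Int :=
  texto.toList.foldl
    (fun dec c =>
      match pvScanTab c (PySem.List.enumerate pvTabela64 0) with
      | some a => dec ++ [a]
      | none => dec) []

-- 'while decimal[i] > 0: …' (int(d/2) = d // 2 for the nonnegative d reached here)
def pvWhileBin (d : Int) (aux : List Int) (contador : Int) : List Int × Int :=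
  if d > 0 then
    pvWhileBin (PySem.Int.floordiv d 2)
      ((if PySem.Int.mod d 2 > 0 then (1 : Int) else 0) :: aux) (contador + 1)
  else (aux, contador)
termination_by d.toNat
decreasing_by
  simp only [PySem.Int.floordiv_eq_ediv_of_pos (show (0:Int) < 2 by norm_num)]
  omega

-- 'while contador < 6: binario_auxiliar.insert(0,0); contador += 1'
def pvPadBin (aux : List Int) (contador : Int) : List Int :=
  if contador < 6 then pvPadBin ((0 : Int) :: aux) (contador + 1) else aux
termination_by (6 - contador).toNat

def pvEncode (d : Int) : List Int :=
  let p := pvWhileBin d [] 0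
  pvPadBin p.1 p.2

def converter_decimal_para_binario (texto : String) : List Int :=
  (converter_caracter_para_decimal texto).foldl (fun bin d => bin ++ pvEncode d) []

-- ===== PORT B =====
def pvTabelaStr : String := "ABCDEFGHIJKLMNOPQRSTUVWXYZabcdefghijklmnopqrstuvwxyz0123456789+/"

def pvB64Dict : PySem.Dict Char Int :=
  PySem.Dict.ofList ((PySem.List.enumerate pvTabelaStr.toList 0).map (fun p => (p.2, p.1)))

-- [int(b) for b in format(i, '06b')]  (6 bits, MSB first; exact for 0 ≤ i < 64)
def pvBits6 (i : Int) : List Int :=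
  [PySem.Int.mod (PySem.Int.floordiv i 32) 2, PySem.Int.mod (PySem.Int.floordiv i 16) 2,
   PySem.Int.mod (PySem.Int.floordiv i 8) 2, PySem.Int.mod (PySem.Int.floordiv i 4) 2,
   PySem.Int.mod (PySem.Int.floordiv i 2) 2, PySem.Int.mod i 2]

def converter_decimal_para_binario_alt (texto : String) : List Int :=
  texto.toList.foldl
    (fun bin c =>
      match pvB64Dict.get? c with
      | some i => bin ++ pvBits6 i
      | none => bin) []

-- ===== PRECONDITION & SPEC =====
def Spec_converter_decimal_para_binario (texto : String) (out : List Int) : Prop := out = converter_decimal_para_binario_alt texto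
instance (texto : String) (out : List Int) : Decidable (Spec_converter_decimal_para_binario texto out) := by unfold Spec_converter_decimal_para_binario; infer_instance

-- ===== CLAIM (what is proved, stated in full; the proofs are below) =====
def Claim_equal_converter_decimal_para_binario : Prop := ∀ (texto : String), Dom_converter_decimal_para_binario texto → Spec_converter_decimal_para_binario texto (converter_decimal_para_binario texto)

-- ===== LEMMAS AND PROOFS =====

lemma dict_get_eq_scan (ps : List (Int × Char)) (c : Char) :
    (PySem.Dict.mk (ps.map (fun p => (p.2, p.1)))).get? c = pvScanTab c ps := by
  induction ps with
  | nil => simp [PySem.Dict.get?, pvScanTab]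
  | cons p ps ih =>
    obtain ⟨a, t⟩ := p
    by_cases h : t = c
    · subst h; simp only [List.map_cons]
      rw [PySem.Dict.get?_mk_cons]
      simp [pvScanTab]
    · simp only [List.map_cons]
      rw [PySem.Dict.get?_mk_cons]
      simp only [pvScanTab]
      rw [if_neg (by simpa using h), if_neg (by simpa using fun hc => h hc.symm), ih]

lemma b64_ofList_eq :
    pvB64Dict = PySem.Dict.mk ((PySem.List.enumerate pvTabela64 0).map (fun p => (p.2, p.1))) := by
  decide

lemma scan_range (c : Char) (i : Int)
    (h : pvScanTab c (PySem.List.enumerate pvTabela64 0) = some i) : 0 ≤ i ∧ i < 64 := by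
  have gen : ∀ (ps : List (Int × Char)), pvScanTab c ps = some i →
      ∃ p, p ∈ ps ∧ i = p.1 := by
    intro ps
    induction ps with
    | nil => simp [pvScanTab]
    | cons p ps ih =>
      obtain ⟨a, t⟩ := p
      simp only [pvScanTab]
      split_ifs with hc
      · intro h'; exact ⟨(a, t), by simp, by simpa using h'.symm⟩
      · intro h'; obtain ⟨q, hq, hi⟩ := ih h'; exact ⟨q, by simp [hq], hi⟩
  obtain ⟨p, hp, hi⟩ := gen _ h
  have hb : ∀ p ∈ PySem.List.enumerate pvTabela64 0, 0 ≤ p.1 ∧ p.1 < 64 := by decide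
  have := hb p hp
  omega

lemma encode_eq_bits6 (i : Int) (h0 : 0 ≤ i) (h64 : i < 64) :
    pvEncode i = pvBits6 i := by
  interval_cases i <;>
  · simp only [pvEncode]
    repeat
      rw [pvWhileBin]
      simp only [PySem.Int.floordiv_eq_ediv_of_pos (show (0:Int) < 2 by norm_num),
        PySem.Int.mod_eq_emod_of_pos (show (0:Int) < 2 by norm_num)]
      norm_num
    repeat
      rw [pvPadBin]
      norm_num
    try norm_num [pvBits6, PySem.Int.floordiv_eq_ediv_of_pos, PySem.Int.mod_eq_emod_of_pos]

lemma decimal_eq_filterMap (cs : List Char) (acc : List Int) :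
    cs.foldl
      (fun dec c =>
        match pvScanTab c (PySem.List.enumerate pvTabela64 0) with
        | some a => dec ++ [a]
        | none => dec) acc
      = acc ++ cs.filterMap (fun c => pvScanTab c (PySem.List.enumerate pvTabela64 0)) := by
  induction cs generalizing acc with
  | nil => simp
  | cons c cs ih =>
    simp only [List.foldl]
    cases hc : pvScanTab c (PySem.List.enumerate pvTabela64 0) <;>
      simp [hc, ih]

lemma alt_fold_fn :
    (fun (bin : List Int) (c : Char) =>
      match pvB64Dict.get? c with
      | some i => bin ++ pvBits6 i
      | none => bin)
    = fun bin c => bin ++ ((pvB64Dict.get? c).elim [] pvBits6) := by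
  funext bin c
  cases h : pvB64Dict.get? c <;> simp [h]

lemma b64_get?_eq_scan (c : Char) :
    pvB64Dict.get? c = pvScanTab c (PySem.List.enumerate pvTabela64 0) := by
  rw [b64_ofList_eq, dict_get_eq_scan]

-- ===== VERDICT (by name: the statement is the Claim_ definition above) =====
theorem converter_decimal_para_binario_spec : Claim_equal_converter_decimal_para_binario := by
  intro texto _
  unfold Spec_converter_decimal_para_binario
  unfold converter_decimal_para_binario converter_decimal_para_binario_alt
  unfold converter_caracter_para_decimal
  rw [decimal_eq_filterMap, alt_fold_fn, PySem.List.foldl_append_eq_flatMap,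
      PySem.List.foldl_append_eq_flatMap]
  simp only [List.nil_append, b64_get?_eq_scan]
  induction texto.toList with
  | nil => rfl
  | cons c cs ih =>
    simp only [List.filterMap_cons]
    cases hc : pvScanTab c (PySem.List.enumerate pvTabela64 0) with
    | none => simpa [hc] using ih
    | some i =>
      have hr := scan_range c i hc
      simp only [hc, Option.elim_some, List.flatMap_cons]
      rw [encode_eq_bits6 i hr.1 hr.2, ih]
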